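-- pv_equiv track=rewrite | github.com/milsav/mcm | archive/Automaton_OLD.py | is_repetition_sequence
-- ===== SOURCE A (Python) =====
-- def is_repetition_sequence(s):
--     length = 1
--     while length <= len(s) // 2:
--         start = s[:length]
--         rest = s[length:]
--         l_start = len(start)
--         l_rest = len(rest)
--         rep_seq = True
--         if l_rest % l_start == 0:
--             shift = 0
--             while shift <= l_rest - l_start:
--                 match = True
--                 for k in range(l_start):
--                     if rest[shift + k] != start[k]:
--                         match = False
--                         break
--
--                 if match:
--                     shift += l_start
--                 else:
--                     rep_seq = False
--                     break
--         else:
--             rep_seq = False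
--
--         if rep_seq:
--             return length
--         else:
--             length += 1
--
--     return 0
-- ===== SOURCE B (Python) =====
-- def is_repetition_sequence(s):
--     n = len(s)
--     for p in range(1, n // 2 + 1):
--         if n % p == 0 and s[p:] == s[:n - p]:
--             return p
--     return 0
-- ===== Notes on version B (the rewrite author's own statement) =====
-- stated objective: simpler
-- what changed: A tiles the string block-by-block with three nested loops (shift loop + char loop inside the candidate-period loop); B tests each candidate period p with the single self-overlap comparison s[p:] == s[:n-p].
import Mathlib
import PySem

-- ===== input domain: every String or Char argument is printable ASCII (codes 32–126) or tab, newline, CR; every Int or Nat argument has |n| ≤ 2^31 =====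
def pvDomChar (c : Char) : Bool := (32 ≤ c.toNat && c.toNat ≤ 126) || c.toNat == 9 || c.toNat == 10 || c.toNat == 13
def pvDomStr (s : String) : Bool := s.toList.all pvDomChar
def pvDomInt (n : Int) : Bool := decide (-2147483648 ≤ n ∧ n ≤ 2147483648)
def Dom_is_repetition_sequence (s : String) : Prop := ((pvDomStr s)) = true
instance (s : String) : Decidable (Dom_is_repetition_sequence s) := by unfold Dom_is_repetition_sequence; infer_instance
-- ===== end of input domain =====

-- B replaces A's block-by-block tiling check (three nested loops) by the classic
-- self-overlap test s[p:] == s[:n-p] per candidate period: simpler, one loop, one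
-- slice comparison per candidate.


-- ===== PORT A =====
-- `for k in range(l_start)` with early break; every index A reads here is in range,
-- so getD with a dummy default is exact there.
def aMatch (rest start : List Char) (shift k : Nat) : Bool :=
  if _h : k < start.length then
    if rest.getD (shift + k) ' ' ≠ start.getD k ' ' then false
    else aMatch rest start shift (k + 1)
  else true
termination_by start.length - k

-- `while shift <= l_rest - l_start` (Python int arithmetic, hence the Int comparison);
-- fuel is only a totality guard — the call passes rest.length + 1, never exhausted.
def aShiftLoop (rest start : List Char) (shift fuel : Nat) : Bool :=
  match fuel with
  | 0 => true
  | fuel + 1 =>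
    if (shift : Int) ≤ (rest.length : Int) - (start.length : Int) then
      if aMatch rest start shift 0 then aShiftLoop rest start (shift + start.length) fuel
      else false
    else true

-- outer `while length <= len(s) // 2` loop
def aOuter (l : List Char) (len : Nat) : Int :=
  if _h : len ≤ l.length / 2 then
    let start := l.take len
    let rest := l.drop len
    let repSeq :=
      if rest.length % start.length == 0 then
        aShiftLoop rest start 0 (rest.length + 1)
      else false
    if repSeq then (len : Int) else aOuter l (len + 1)
  else 0
termination_by l.length / 2 + 1 - len

def is_repetition_sequence (s : String) : Int := aOuter s.toList 1

-- ===== PORT B =====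
-- `for p in range(1, n//2 + 1)`: return the first p with n % p == 0 and s[p:] == s[:n-p];
-- both slice bounds are nonnegative and ≤ n, so drop/take are exact.
def is_repetition_sequence_alt (s : String) : Int :=
  let l := s.toList
  let n := l.length
  match (List.range' 1 (n / 2)).find? (fun p => n % p == 0 && l.drop p == l.take (n - p)) with
  | some p => (p : Int)
  | none => 0

-- ===== PRECONDITION & SPEC =====
def Spec_is_repetition_sequence (s : String) (out : Int) : Prop := out = is_repetition_sequence_alt s
instance (s : String) (out : Int) : Decidable (Spec_is_repetition_sequence s out) := by unfold Spec_is_repetition_sequence; infer_instance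

-- ===== CLAIM (what is proved, stated in full; the proofs are below) =====
def Claim_equal_is_repetition_sequence : Prop := ∀ (s : String), Dom_is_repetition_sequence s → Spec_is_repetition_sequence s (is_repetition_sequence s)

-- ===== LEMMAS AND PROOFS =====

-- the inner for-loop checks the block of length `start.length` at offset `shift`
theorem aMatch_eq_true (rest start : List Char) (shift k : Nat) :
    aMatch rest start shift k = true ↔
      ∀ j, k ≤ j → j < start.length → rest.getD (shift + j) ' ' = start.getD j ' ' := by
  fun_induction aMatch rest start shift k with
  | case1 k hk hne =>
    simp only [ne_eq] at hne
    constructor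
    · intro h; exact absurd h (by simp)
    · intro h; exact absurd (h k le_rfl hk) hne
  | case2 k hk hne ih =>
    simp only [ne_eq, not_not] at hne
    rw [ih]
    constructor
    · intro h j hkj hj
      rcases Nat.eq_or_lt_of_le hkj with rfl | hlt
      · exact hne
      · exact h j hlt hj
    · intro h j hkj hj; exact h j (by omega) hj
  | case3 k hk =>
    refine ⟨fun _ j hkj hj => by omega, fun _ => rfl⟩

theorem mod_shift (q shift k : Nat) (h : q ∣ shift) (hk : k < q) : (shift + k) % q = k := by
  obtain ⟨t, rfl⟩ := h
  rw [Nat.mul_add_mod, Nat.mod_eq_of_lt hk]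

-- the shift loop checks all blocks from `shift` on, i.e. tiling by `start`
theorem aShiftLoop_eq_true (rest start : List Char) (fuel shift : Nat)
    (hq : 0 < start.length) (hdr : start.length ∣ rest.length) (hds : start.length ∣ shift)
    (hfuel : rest.length + 1 - shift ≤ fuel) :
    aShiftLoop rest start shift fuel = true ↔
      ∀ j, shift ≤ j → j < rest.length →
        rest.getD j ' ' = start.getD (j % start.length) ' ' := by
  induction fuel generalizing shift with
  | zero =>
    simp only [aShiftLoop]
    refine ⟨fun _ j hsj hjr => by omega, fun _ => by simp⟩
  | succ f ih =>
    simp only [aShiftLoop]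
    by_cases hle : (shift : Int) ≤ (rest.length : Int) - (start.length : Int)
    · rw [if_pos hle]
      have hsq : shift + start.length ≤ rest.length := by omega
      by_cases hm : aMatch rest start shift 0 = true
      · rw [if_pos hm]
        rw [ih (shift + start.length) (hds.add dvd_rfl) (by omega)]
        have hblock := (aMatch_eq_true rest start shift 0).mp hm
        constructor
        · intro h j hsj hjr
          by_cases hjb : j < shift + start.length
          · have hk := hblock (j - shift) (by omega) (by omega)
            have he : shift + (j - shift) = j := by omega
            rw [he] at hk
            have hmod : j % start.length = j - shift := by
              conv_lhs => rw [show j = shift + (j - shift) from by omega]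
              rw [mod_shift _ _ _ hds (by omega)]
            rw [hmod]
            exact hk
          · exact h j (by omega) hjr
        · intro h j hsj hjr
          exact h j (by omega) hjr
      · have hm' : aMatch rest start shift 0 = false := by
          simpa using hm
        rw [if_neg (by simp [hm'])]
        constructor
        · intro h; exact absurd h (by simp)
        · intro h
          exfalso
          apply hm
          rw [aMatch_eq_true]
          intro k _ hk
          have hj := h (shift + k) (by omega) (by omega)
          rw [mod_shift _ _ _ hds hk] at hj
          exact hj
    · rw [if_neg hle]
      have hvac : ∀ j, shift ≤ j → j < rest.length → False := by
        intro j hsj hjr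
        have h1 : start.length ∣ rest.length - shift := Nat.dvd_sub hdr hds
        have h2 : start.length ≤ rest.length - shift := Nat.le_of_dvd (by omega) h1
        omega
      exact ⟨fun _ j hsj hjr => absurd (hvac j hsj hjr) (by simp), fun _ => rfl⟩

-- arithmetic: a p-periodic prefix is tiled by its first p characters, and conversely
theorem tile_of_period {α : Type} (f : Nat → α) (p m : Nat) (hp : 0 < p)
    (h : ∀ j, j < m → f (p + j) = f j) : ∀ j, j < m → f j = f (j % p) := by
  intro j
  induction j using Nat.strong_induction_on with
  | _ j ih =>
    intro hj
    by_cases hjp : j < p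
    · rw [Nat.mod_eq_of_lt hjp]
    · have h1 : p + (j - p) = j := by omega
      have h2 : j - p < m := by omega
      have hper := h (j - p) h2
      rw [h1] at hper
      rw [hper, ih (j - p) (by omega) (by omega)]
      conv_rhs => rw [Nat.mod_eq_sub_mod (show p ≤ j from by omega)]

theorem tile_of_tiled {α : Type} (f : Nat → α) (p m : Nat) (hp : 0 < p)
    (h : ∀ j, j < m → f (p + j) = f (j % p)) : ∀ j, j < m → f j = f (j % p) := by
  intro j hj
  by_cases hjp : j < p
  · rw [Nat.mod_eq_of_lt hjp]
  · have h1 : p + (j - p) = j := by omega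
    have ht := h (j - p) (by omega)
    rw [h1] at ht
    rw [ht]
    conv_rhs => rw [Nat.mod_eq_sub_mod (show p ≤ j from by omega)]

theorem period_iff_tiled {α : Type} (f : Nat → α) (p m : Nat) (hp : 0 < p) :
    (∀ j, j < m → f (p + j) = f j) ↔ (∀ j, j < m → f (p + j) = f (j % p)) := by
  constructor
  · intro h j hj; rw [h j hj]; exact tile_of_period f p m hp h j hj
  · intro h j hj; rw [h j hj]; exact (tile_of_tiled f p m hp h j hj).symm

-- getD translations through drop/take
theorem getD_drop (l : List Char) (p j : Nat) :
    (l.drop p).getD j ' ' = l.getD (p + j) ' ' := by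
  simp [List.getD_eq_getElem?_getD, List.getElem?_drop]

theorem getD_take (l : List Char) (p k : Nat) (hk : k < p) :
    (l.take p).getD k ' ' = l.getD k ' ' := by
  simp [List.getD_eq_getElem?_getD, hk]

theorem drop_eq_take_iff (l : List Char) (p : Nat) (hp : p ≤ l.length) :
    l.drop p = l.take (l.length - p) ↔
      ∀ j, j < l.length - p → l.getD (p + j) ' ' = l.getD j ' ' := by
  constructor
  · intro h j hj
    have h2 := congrArg (fun t => List.getD t j ' ') h
    simp only [] at h2
    rw [getD_drop, getD_take _ _ _ hj] at h2
    exact h2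
  · intro h
    apply List.ext_getElem
    · simp
    · intro i h1 h2
      have hi : i < l.length - p := by simpa using h1
      have hgd := h i hi
      rw [List.getD_eq_getElem l ' ' (by omega), List.getD_eq_getElem l ' ' (by omega)] at hgd
      simpa [List.getElem_drop, List.getElem_take] using hgd

-- per candidate p: A's rep_seq computation equals B's test
theorem cond_eq (l : List Char) (p : Nat) (h1 : 1 ≤ p) (h2 : p ≤ l.length / 2) :
    (if (l.drop p).length % (l.take p).length == 0 then
        aShiftLoop (l.drop p) (l.take p) 0 ((l.drop p).length + 1)
      else false)
    = (l.length % p == 0 && l.drop p == l.take (l.length - p)) := by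
  have hpn : p ≤ l.length := by omega
  have hq : (l.take p).length = p := by simp [hpn]
  have hr : (l.drop p).length = l.length - p := by simp
  have hmod : (l.length - p) % p = l.length % p := by
    conv_rhs => rw [show l.length = (l.length - p) + p from by omega]
    rw [Nat.add_mod_right]
  by_cases h0 : l.length % p = 0
  · have hdvd : p ∣ l.length - p :=
      Nat.dvd_sub (Nat.dvd_of_mod_eq_zero h0) dvd_rfl
    have hc1 : ((l.drop p).length % (l.take p).length == 0) = true := by
      rw [hq, hr, hmod]; simpa using h0
    rw [if_pos hc1]
    have hb0 : (l.length % p == 0) = true := by simpa using h0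
    rw [hb0, Bool.true_and]
    have key : aShiftLoop (l.drop p) (l.take p) 0 ((l.drop p).length + 1) = true ↔
        (l.drop p == l.take (l.length - p)) = true := by
      rw [aShiftLoop_eq_true (l.drop p) (l.take p) ((l.drop p).length + 1) 0 (by omega)
        (by rw [hq, hr]; exact hdvd) (dvd_zero _) (by omega)]
      rw [beq_iff_eq, drop_eq_take_iff l p hpn]
      rw [period_iff_tiled (fun i => l.getD i ' ') p (l.length - p) (by omega)]
      constructor
      · intro h j hj
        have hjlt : j < (l.drop p).length := by omega
        have := h j (by omega) hjlt
        rw [getD_drop, hq, getD_take _ _ _ (Nat.mod_lt _ (by omega))] at this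
        exact this
      · intro h j _ hj
        rw [getD_drop, hq, getD_take _ _ _ (Nat.mod_lt _ (by omega))]
        exact h j (by omega)
    cases hb : (l.drop p == l.take (l.length - p)) with
    | true => exact key.mpr hb
    | false =>
      rcases Bool.eq_false_or_eq_true (aShiftLoop (l.drop p) (l.take p) 0 ((l.drop p).length + 1)) with h' | h'
      · rw [key.mp h'] at hb; exact absurd hb (by simp)
      · exact h'
  · have hc1 : ((l.drop p).length % (l.take p).length == 0) = false := by
      rw [hq, hr, hmod]; simpa using h0
    rw [if_neg (by simp only [hc1]; exact Bool.false_ne_true)]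
    have hb0 : (l.length % p == 0) = false := by simpa using h0
    rw [hb0, Bool.false_and]

-- the outer loops align step by step
theorem outer_eq (l : List Char) (c : Nat) : ∀ len, 1 ≤ len →
    len + c = l.length / 2 + 1 →
    aOuter l len =
      match (List.range' len c).find?
          (fun p => l.length % p == 0 && l.drop p == l.take (l.length - p)) with
      | some p => (p : Int)
      | none => 0 := by
  induction c with
  | zero =>
    intro len h1 hc
    rw [aOuter, dif_neg (by omega)]
    simp
  | succ c ih =>
    intro len h1 hc
    have hlen : len ≤ l.length / 2 := by omega
    rw [aOuter, dif_pos hlen]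
    simp only []
    rw [cond_eq l len h1 hlen, List.range'_succ]
    cases hpred : (l.length % len == 0 && l.drop len == l.take (l.length - len)) with
    | true =>
      simp [hpred]
    | false =>
      simp only [Bool.false_eq_true, if_false, List.find?, hpred]
      exact ih (len + 1) (by omega) (by omega)

-- ===== VERDICT (by name: the statement is the Claim_ definition above) =====
theorem is_repetition_sequence_spec : Claim_equal_is_repetition_sequence := by
  intro s _
  unfold Spec_is_repetition_sequence is_repetition_sequence is_repetition_sequence_alt
  exact outer_eq s.toList (s.toList.length / 2) 1 le_rfl (by omega)
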